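-- pv_equiv track=rewrite | github.com/Consensys/mythx-cli | mythx_cli/payload/util.py | zero_srcmap_indices
-- ===== SOURCE A (Python) =====
-- from copy import copy
--
-- def zero_srcmap_indices(src_map: str) -> str:
--     """Zero the source map file index entries.
--
--     :param src_map: The source map string to process
--     :return: The processed source map string
--     """
--     entries = src_map.split(";")
--     new_entries = copy(entries)
--     for i, entry in enumerate(entries):
--         fields = entry.split(":")
--         if len(fields) > 2 and fields[2] not in ("-1", ""):
--             # file index is in entry, needs fixing
--             fields[2] = "0"
--             new_entries[i] = ":".join(fields)
--     return ";".join(new_entries)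
-- ===== SOURCE B (Python) =====
-- def zero_srcmap_indices(src_map: str) -> str:
--     """Zero the source map file index entries (single-pass scan, no split/rejoin)."""
--     out = []
--     colons = 0   # colons seen so far in the current entry
--     field = []   # buffered characters of the entry's third field
--     for ch in src_map:
--         if ch == ";":
--             if colons == 2:
--                 f = "".join(field)
--                 out.append(f if f in ("", "-1") else "0")
--                 field = []
--             out.append(ch)
--             colons = 0
--         elif ch == ":":
--             if colons == 2:
--                 f = "".join(field)
--                 out.append(f if f in ("", "-1") else "0")
--                 field = []
--             out.append(ch)
--             colons += 1
--         elif colons == 2: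
--             field.append(ch)
--         else:
--             out.append(ch)
--     if colons == 2:
--         f = "".join(field)
--         out.append(f if f in ("", "-1") else "0")
--     return "".join(out)
-- ===== Notes on version B (the rewrite author's own statement) =====
-- stated objective: alternative
-- what changed: A tokenizes: it splits the map into entries, re-splits each entry into colon-separated fields, patches field 2 and joins everything back; B is a single character-level pass with a small state machine (a colon counter plus a buffer for the third field) that never materialises the entry or field lists.
import Mathlib
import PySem

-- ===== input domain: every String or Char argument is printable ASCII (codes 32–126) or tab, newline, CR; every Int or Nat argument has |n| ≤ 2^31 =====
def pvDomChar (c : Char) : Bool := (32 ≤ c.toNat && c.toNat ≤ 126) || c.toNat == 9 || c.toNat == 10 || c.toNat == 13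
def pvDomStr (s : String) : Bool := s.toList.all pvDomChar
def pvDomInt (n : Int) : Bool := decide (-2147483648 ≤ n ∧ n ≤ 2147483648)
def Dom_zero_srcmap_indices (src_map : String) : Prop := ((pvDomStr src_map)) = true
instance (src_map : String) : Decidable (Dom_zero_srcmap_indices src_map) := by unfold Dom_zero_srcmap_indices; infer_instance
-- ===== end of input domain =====

-- B replaces A's split/loop/rejoin with a single character-level scan (a small state machine); same return value, similar cost ('alternative').

-- ===== PORT A =====
def zero_srcmap_indices (src_map : String) : String :=
  let entries := PySem.Chars.splitOn src_map.toList [';']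
  let new_entries := entries      -- copy(entries)
  let new_entries := (PySem.List.enumerate entries).foldl (fun ne ie =>
    let fields := PySem.Chars.splitOn ie.2 [':']
    if 2 < fields.length ∧
        ¬(PySem.List.pyGetD fields 2 [] = ['-', '1'] ∨ PySem.List.pyGetD fields 2 [] = []) then
      PySem.List.pySetD ne ie.1 (PySem.Chars.join [':'] (PySem.List.pySetD fields 2 ['0']))
    else ne) new_entries
  String.ofList (PySem.Chars.join [';'] new_entries)

-- ===== PORT B =====
def zsFlush (field : List Char) : List Char :=
  if field = [] ∨ field = ['-', '1'] then field else ['0']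

def zsStep (st : List Char × Nat × List Char) (ch : Char) : List Char × Nat × List Char :=
  let out := st.1; let colons := st.2.1; let field := st.2.2
  if ch = ';' then
    if colons = 2 then (out ++ zsFlush field ++ [ch], 0, []) else (out ++ [ch], 0, field)
  else if ch = ':' then
    if colons = 2 then (out ++ zsFlush field ++ [ch], colons + 1, [])
    else (out ++ [ch], colons + 1, field)
  else if colons = 2 then (out, colons, field ++ [ch])
  else (out ++ [ch], colons, field)

def zero_srcmap_indices_alt (src_map : String) : String :=
  let st := src_map.toList.foldl zsStep ([], 0, [])
  String.ofList (if st.2.1 = 2 then st.1 ++ zsFlush st.2.2 else st.1)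

-- ===== PRECONDITION & SPEC =====
def Spec_zero_srcmap_indices (src_map : String) (out : String) : Prop := out = zero_srcmap_indices_alt src_map
instance (src_map : String) (out : String) : Decidable (Spec_zero_srcmap_indices src_map out) := by unfold Spec_zero_srcmap_indices; infer_instance

-- ===== CLAIM (what is proved, stated in full; the proofs are below) =====
def Claim_equal_zero_srcmap_indices : Prop := ∀ (src_map : String), Dom_zero_srcmap_indices src_map → Spec_zero_srcmap_indices src_map (zero_srcmap_indices src_map)

-- ===== LEMMAS AND PROOFS =====

/-- Structural version of Python's `split` on a single-character separator. -/
def mySplit (c : Char) : List Char → List (List Char)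
  | [] => [[]]
  | x :: xs =>
    let r := mySplit c xs
    if x = c then [] :: r else
      match r with
      | [] => [[x]]
      | h :: t => (x :: h) :: t

theorem mySplit_ne_nil (c : Char) (l : List Char) : mySplit c l ≠ [] := by
  cases l with
  | nil => simp [mySplit]
  | cons x xs =>
    simp only [mySplit]
    split_ifs with h
    · simp
    · cases mySplit c xs <;> simp

theorem go_eq_mySplit (c : Char) : ∀ (fuel : Nat) (l cur : List Char) (acc : List (List Char)), l.length ≤ fuel →
    PySem.Chars.splitOn.go [c] fuel l cur acc =
      acc.reverse ++ (cur.reverse ++ (mySplit c l).headI) :: (mySplit c l).tail := by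
  intro fuel
  induction fuel with
  | zero =>
    intro l cur acc hl
    have : l = [] := by cases l <;> simp_all
    subst this
    simp [PySem.Chars.splitOn.go, mySplit]
  | succ f ih =>
    intro l cur acc hl
    cases l with
    | nil => simp [PySem.Chars.splitOn.go, mySplit]
    | cons x rest =>
      rw [PySem.Chars.splitOn.go.eq_def]
      by_cases hx : x = c
      · subst hx
        simp only [List.isPrefixOf, beq_self_eq_true, Bool.true_and,
          if_true, List.length_cons] at *
        rw [show List.drop (List.length ([] : List Char) + 1) (x :: rest) = rest by simp,
          ih rest [] (cur.reverse :: acc) (by omega)]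
        have hne := mySplit_ne_nil x rest
        simp only [mySplit, List.headI, List.tail]
        cases hms : mySplit x rest with
        | nil => exact absurd hms hne
        | cons h t => simp
      · have hpre : [c].isPrefixOf (x :: rest) = false := by
          simp [List.isPrefixOf]
          exact fun h => absurd h.symm hx
        simp only [hpre, Bool.false_eq_true, if_false]
        rw [ih rest (x :: cur) acc (by simp at hl; omega)]
        have hne := mySplit_ne_nil c rest
        simp only [mySplit, if_neg hx]
        cases hms : mySplit c rest with
        | nil => exact absurd hms hne
        | cons h t => simp

theorem splitOn_eq_mySplit (c : Char) (l : List Char) :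
    PySem.Chars.splitOn l [c] = mySplit c l := by
  rw [PySem.Chars.splitOn, go_eq_mySplit c (l.length + 1) l [] [] (by omega)]
  have hne := mySplit_ne_nil c l
  cases hms : mySplit c l with
  | nil => exact absurd hms hne
  | cons h t => simp

theorem mem_of_mem_mySplit (c : Char) : ∀ (l f : List Char), f ∈ mySplit c l → ∀ a ∈ f, a ∈ l := by
  intro l
  induction l with
  | nil => intro f hf; simp [mySplit] at hf; simp [hf]
  | cons x xs ih =>
    intro f hf a ha
    simp only [mySplit] at hf
    split_ifs at hf with h
    · rcases List.mem_cons.1 hf with h1 | h1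
      · subst h1; simp at ha
      · exact List.mem_cons_of_mem _ (ih f h1 a ha)
    · cases hms : mySplit c xs with
      | nil => exact absurd hms (mySplit_ne_nil c xs)
      | cons hd t =>
        rw [hms] at hf
        rcases List.mem_cons.1 hf with h1 | h1
        · subst h1
          rcases List.mem_cons.1 ha with h2 | h2
          · simp [h2]
          · exact List.mem_cons_of_mem _ (ih hd (by rw [hms]; exact List.mem_cons_self) a h2)
        · exact List.mem_cons_of_mem _ (ih f (by rw [hms]; exact List.mem_cons_of_mem _ h1) a ha)

theorem sep_not_mem_mySplit (c : Char) : ∀ (l f : List Char), f ∈ mySplit c l → c ∉ f := by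
  intro l
  induction l with
  | nil => intro f hf; simp [mySplit] at hf; simp [hf]
  | cons x xs ih =>
    intro f hf
    simp only [mySplit] at hf
    split_ifs at hf with h
    · rcases List.mem_cons.1 hf with h1 | h1
      · simp [h1]
      · exact ih f h1
    · cases hms : mySplit c xs with
      | nil => exact absurd hms (mySplit_ne_nil c xs)
      | cons hd t =>
        rw [hms] at hf
        rcases List.mem_cons.1 hf with h1 | h1
        · subst h1
          intro hc
          rcases List.mem_cons.1 hc with h2 | h2
          · exact h h2.symm
          · exact ih hd (by rw [hms]; exact List.mem_cons_self) h2
        · exact ih f (by rw [hms]; exact List.mem_cons_of_mem _ h1)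

theorem join_mySplit (c : Char) : ∀ (l : List Char), PySem.Chars.join [c] (mySplit c l) = l := by
  intro l
  induction l with
  | nil => simp [mySplit, PySem.Chars.join_singleton]
  | cons x xs ih =>
    simp only [mySplit]
    split_ifs with h
    · subst h
      cases hms : mySplit x xs with
      | nil => exact absurd hms (mySplit_ne_nil x xs)
      | cons hd t =>
        rw [hms] at ih
        rw [PySem.Chars.join_cons_cons, ih]
        simp
    · cases hms : mySplit c xs with
      | nil => exact absurd hms (mySplit_ne_nil c xs)
      | cons hd t =>
        rw [hms] at ih
        cases t with
        | nil => rw [PySem.Chars.join_singleton] at ih ⊢; simp [ih]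
        | cons z zs =>
          rw [PySem.Chars.join_cons_cons] at ih ⊢
          simp [ih]

/-- What A does to one entry. -/
def entryOut (entry : List Char) : List Char :=
  let fields := PySem.Chars.splitOn entry [':']
  if 2 < fields.length ∧
      ¬(PySem.List.pyGetD fields 2 [] = ['-', '1'] ∨ PySem.List.pyGetD fields 2 [] = []) then
    PySem.Chars.join [':'] (PySem.List.pySetD fields 2 ['0'])
  else entry

-- A's enumerate/index-assignment loop is a map.
theorem foldl_enum_set (P : List Char → Prop) [DecidablePred P] (g : List Char → List Char) :
    ∀ (xs pre : List (List Char)),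
      (PySem.List.enumerate xs (pre.length : Int)).foldl
        (fun ne ie => if P ie.2 then PySem.List.pySetD ne ie.1 (g ie.2) else ne) (pre ++ xs)
      = pre ++ xs.map (fun e => if P e then g e else e) := by
  intro xs
  induction xs with
  | nil => intro pre; simp [PySem.List.enumerate]
  | cons x t ih =>
    intro pre
    rw [PySem.List.enumerate]
    simp only [List.foldl_cons, List.map_cons]
    have hset : ∀ v : List Char, PySem.List.pySetD (pre ++ x :: t) (pre.length : Int) v = pre ++ v :: t := by
      intro v
      rw [PySem.List.pySetD_natCast]
      simp
    have key : ∀ v : List Char,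
        (PySem.List.enumerate t ((pre.length : Int) + 1)).foldl
          (fun ne ie => if P ie.2 then PySem.List.pySetD ne ie.1 (g ie.2) else ne) (pre ++ v :: t)
        = pre ++ v :: t.map (fun e => if P e then g e else e) := by
      intro v
      have := ih (pre ++ [v])
      simp only [List.length_append, List.length_cons, List.length_nil, List.append_assoc,
        List.singleton_append, Nat.cast_add, Nat.cast_one] at this
      simpa using this
    by_cases hp : P x
    · simp only [if_pos hp, hset]
      exact key (g x)
    · simp only [if_neg hp]
      exact key x

theorem A_eq_map (s : String) :
    zero_srcmap_indices s
      = String.ofList (PySem.Chars.join [';'] ((mySplit ';' s.toList).map entryOut)) := by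
  rw [zero_srcmap_indices]
  have := foldl_enum_set
    (fun entry => 2 < (PySem.Chars.splitOn entry [':']).length ∧
      ¬(PySem.List.pyGetD (PySem.Chars.splitOn entry [':']) 2 [] = ['-', '1'] ∨
        PySem.List.pyGetD (PySem.Chars.splitOn entry [':']) 2 [] = []))
    (fun entry => PySem.Chars.join [':'] (PySem.List.pySetD (PySem.Chars.splitOn entry [':']) 2 ['0']))
    (PySem.Chars.splitOn s.toList [';']) []
  simp only [List.length_nil, Nat.cast_zero, List.nil_append] at this
  rw [this, splitOn_eq_mySplit]
  congr 1

-- ---- B-side machine lemmas ----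

def finz (st : List Char × Nat × List Char) : List Char :=
  if st.2.1 = 2 then st.1 ++ zsFlush st.2.2 else st.1

theorem run_plain (cs : List Char) : ∀ (out field : List Char) (colons : Nat),
    (∀ a ∈ cs, a ≠ ';' ∧ a ≠ ':') → colons ≠ 2 →
    cs.foldl zsStep (out, colons, field) = (out ++ cs, colons, field) := by
  induction cs with
  | nil => intro out field colons _ _; simp
  | cons x t ih =>
    intro out field colons h hc
    have hx := h x List.mem_cons_self
    simp only [List.foldl_cons, zsStep, if_neg hx.1, if_neg hx.2, if_neg hc]
    rw [ih (out ++ [x]) field colons (fun a ha => h a (List.mem_cons_of_mem _ ha)) hc]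
    simp

theorem run_buffer (cs : List Char) : ∀ (out field : List Char),
    (∀ a ∈ cs, a ≠ ';' ∧ a ≠ ':') →
    cs.foldl zsStep (out, 2, field) = (out, 2, field ++ cs) := by
  induction cs with
  | nil => intro out field _; simp
  | cons x t ih =>
    intro out field h
    have hx := h x List.mem_cons_self
    simp only [List.foldl_cons, zsStep, if_neg hx.1, if_neg hx.2, reduceIte]
    rw [ih out (field ++ [x]) (fun a ha => h a (List.mem_cons_of_mem _ ha))]
    simp

theorem run_tail (cs : List Char) : ∀ (out field : List Char) (colons : Nat),
    (∀ a ∈ cs, a ≠ ';') → 3 ≤ colons →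
    ∃ c', 3 ≤ c' ∧ cs.foldl zsStep (out, colons, field) = (out ++ cs, c', field) := by
  induction cs with
  | nil => intro out field colons _ hc; exact ⟨colons, hc, by simp⟩
  | cons x t ih =>
    intro out field colons h hc
    have hx := h x List.mem_cons_self
    by_cases hcol : x = ':'
    · subst hcol
      simp only [List.foldl_cons, zsStep, if_neg hx, reduceIte, if_neg (by omega : colons ≠ 2)]
      obtain ⟨c', hc', heq⟩ := ih (out ++ [':']) field (colons + 1)
        (fun a ha => h a (List.mem_cons_of_mem _ ha)) (by omega)
      exact ⟨c', hc', by rw [heq]; simp⟩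
    · simp only [List.foldl_cons, zsStep, if_neg hx, if_neg hcol, if_neg (by omega : colons ≠ 2)]
      obtain ⟨c', hc', heq⟩ := ih (out ++ [x]) field colons
        (fun a ha => h a (List.mem_cons_of_mem _ ha)) hc
      exact ⟨c', hc', by rw [heq]; simp⟩

-- small step facts about the machine
theorem step_colon_low (out field : List Char) (colons : Nat) (h2 : colons ≠ 2) :
    zsStep (out, colons, field) ':' = (out ++ [':'], colons + 1, field) := by
  simp [zsStep, h2]

theorem step_colon_two (out field : List Char) :
    zsStep (out, 2, field) ':' = (out ++ zsFlush field ++ [':'], 3, []) := by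
  simp [zsStep]

theorem join_no_semi : ∀ (fs : List (List Char)), (∀ f ∈ fs, ∀ a ∈ f, a ≠ ';') →
    ∀ a ∈ PySem.Chars.join [':'] fs, a ≠ ';' := by
  intro fs
  induction fs with
  | nil => intro _ a ha; rw [PySem.Chars.join_nil] at ha; simp at ha
  | cons x t ih =>
    intro h a ha
    cases t with
    | nil => rw [PySem.Chars.join_singleton] at ha; exact h x List.mem_cons_self a ha
    | cons y ys =>
      rw [PySem.Chars.join_cons_cons] at ha
      rcases List.mem_append.1 ha with h1 | h1
      · rcases List.mem_append.1 h1 with h2 | h2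
        · exact h x List.mem_cons_self a h2
        · simp only [List.mem_singleton] at h2; subst h2; decide
      · exact ih (fun f hf => h f (List.mem_cons_of_mem _ hf)) a h1

theorem join4 (a b u : List Char) (rest : List (List Char)) :
    PySem.Chars.join [':'] (a :: b :: u :: rest)
      = a ++ ':' :: b ++ ':' :: u ++ (if rest = [] then ([] : List Char) else ':' :: PySem.Chars.join [':'] rest) := by
  cases rest with
  | nil =>
    rw [PySem.Chars.join_cons_cons, PySem.Chars.join_cons_cons, PySem.Chars.join_singleton]
    simp
  | cons r rs =>
    rw [PySem.Chars.join_cons_cons, PySem.Chars.join_cons_cons, PySem.Chars.join_cons_cons]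
    simp

theorem entryOut_short (e : List Char) (h : (mySplit ':' e).length ≤ 2) : entryOut e = e := by
  simp only [entryOut, splitOn_eq_mySplit]
  exact if_neg (fun hc => absurd hc.1 (by omega))

theorem entryOut_long (e a b t : List Char) (rest : List (List Char))
    (hms : mySplit ':' e = a :: b :: t :: rest) :
    entryOut e = a ++ ':' :: b ++ ':' :: zsFlush t ++
      (if rest = [] then ([] : List Char) else ':' :: PySem.Chars.join [':'] rest) := by
  have he : e = PySem.Chars.join [':'] (a :: b :: t :: rest) := by rw [← hms, join_mySplit]
  have hget : PySem.List.pyGetD (a :: b :: t :: rest) 2 ([] : List Char) = t := by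
    rw [PySem.List.pyGetD_eq_getElem _ _ (by norm_num) (by simp; omega)]
    simp [show ((2 : Int)).toNat = 2 by decide]
  have hset : PySem.List.pySetD (a :: b :: t :: rest) 2 ['0'] = a :: b :: ['0'] :: rest := by
    rw [PySem.List.pySetD_of_nonneg _ _ (by norm_num)]
    simp [show ((2 : Int)).toNat = 2 by decide]
  simp only [entryOut, splitOn_eq_mySplit, hms, hget, hset]
  by_cases ht : t = [] ∨ t = ['-', '1']
  · rw [if_neg (fun hc => hc.2 (by tauto)), he, join4, zsFlush, if_pos ht]
  · rw [if_pos ⟨by simp, fun hc => ht (by tauto)⟩, join4, zsFlush, if_neg ht]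

-- the state of the machine after one ';'-free entry, by the shape of its ':'-split
theorem entry_state' (fs : List (List Char)) (hfs : ∀ f ∈ fs, ∀ a ∈ f, a ≠ ';' ∧ a ≠ ':') (out : List Char) :
    (fs.length ≤ 2 ∧ (PySem.Chars.join [':'] fs).foldl zsStep (out, 0, [])
        = (out ++ PySem.Chars.join [':'] fs, fs.length - 1, []))
  ∨ (∃ a b t, fs = [a, b, t] ∧ (PySem.Chars.join [':'] fs).foldl zsStep (out, 0, [])
        = (out ++ a ++ ':' :: b ++ [':'], 2, t))
  ∨ (∃ a b t rest, rest ≠ [] ∧ fs = a :: b :: t :: rest ∧ ∃ c', c' ≠ 2 ∧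
      (PySem.Chars.join [':'] fs).foldl zsStep (out, 0, [])
        = (out ++ a ++ ':' :: b ++ ':' :: zsFlush t ++ ':' :: PySem.Chars.join [':'] rest, c', [])) := by
  match fs, hfs with
  | [], _ => left; simp [PySem.Chars.join_nil]
  | [a], hfs =>
    left
    refine ⟨by simp, ?_⟩
    rw [PySem.Chars.join_singleton,
      run_plain a out [] 0 (hfs a List.mem_cons_self) (by omega)]
    simp
  | [a, b], hfs =>
    left
    refine ⟨by simp, ?_⟩
    have ha := hfs a List.mem_cons_self
    have hb := hfs b (by simp)
    rw [PySem.Chars.join_cons_cons, PySem.Chars.join_singleton]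
    simp only [List.append_assoc]
    rw [List.foldl_append, run_plain a out [] 0 ha (by omega),
      List.foldl_append, List.foldl_cons, List.foldl_nil, step_colon_low _ _ _ (by omega),
      run_plain b _ [] 1 hb (by omega)]
    simp
  | a :: b :: t :: rest, hfs =>
    right
    have ha := hfs a List.mem_cons_self
    have hb := hfs b (by simp)
    have htc := hfs t (by simp)
    have hpre : (PySem.Chars.join [':'] (a :: b :: t :: rest)).foldl zsStep (out, 0, [])
        = (PySem.Chars.join [':'] (t :: rest)).foldl zsStep (out ++ a ++ ':' :: b ++ [':'], 2, []) := by
      rw [PySem.Chars.join_cons_cons, PySem.Chars.join_cons_cons]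
      simp only [List.append_assoc]
      rw [List.foldl_append, run_plain a out [] 0 ha (by omega),
        List.foldl_append, List.foldl_cons, List.foldl_nil, step_colon_low _ _ _ (by omega),
        List.foldl_append, run_plain b _ [] 1 hb (by omega),
        List.foldl_append, List.foldl_cons, List.foldl_nil, step_colon_low _ _ _ (by omega)]
      simp
    cases rest with
    | nil =>
      left
      refine ⟨a, b, t, rfl, ?_⟩
      rw [hpre, PySem.Chars.join_singleton, run_buffer t _ [] htc]
      simp
    | cons r rs =>
      right
      refine ⟨a, b, t, r :: rs, by simp, rfl, ?_⟩
      rw [hpre, PySem.Chars.join_cons_cons, List.foldl_append, List.foldl_append,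
        run_buffer t _ [] htc, List.foldl_cons, List.foldl_nil, step_colon_two]
      obtain ⟨c', hc', heq⟩ := run_tail (PySem.Chars.join [':'] (r :: rs)) _ [] 3
        (join_no_semi (r :: rs) (fun f hf a haf => (hfs f (by simp [hf]) a haf).1) )
        (by omega)
      refine ⟨c', by omega, ?_⟩
      rw [heq]
      simp

theorem entry_fields (e : List Char) (he : ∀ a ∈ e, a ≠ ';') :
    ∀ f ∈ mySplit ':' e, ∀ a ∈ f, a ≠ ';' ∧ a ≠ ':' := by
  intro f hf a ha
  exact ⟨he a (mem_of_mem_mySplit ':' e f hf a ha),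
    fun hc => sep_not_mem_mySplit ':' e f hf (hc ▸ ha)⟩

-- finishing an entry at end of string
theorem entry_finz (e : List Char) (he : ∀ a ∈ e, a ≠ ';') (out : List Char) :
    finz (e.foldl zsStep (out, 0, [])) = out ++ entryOut e := by
  have hj : PySem.Chars.join [':'] (mySplit ':' e) = e := join_mySplit ':' e
  rcases entry_state' (mySplit ':' e) (entry_fields e he) out with
      ⟨hlen, hst⟩ | ⟨a, b, t, hms, hst⟩ | ⟨a, b, t, rest, hrne, hms, c', hc', hst⟩
  · rw [hj] at hst
    rw [hst, finz, if_neg (by simp; omega), entryOut_short e hlen]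
  · rw [hj] at hst
    rw [hst, finz, if_pos rfl, entryOut_long e a b t [] hms]
    simp
  · rw [hj] at hst
    rw [hst, finz, if_neg (by simpa using hc'), entryOut_long e a b t rest hms, if_neg hrne]
    simp

-- finishing an entry at a ';'
theorem entry_semi (e : List Char) (he : ∀ a ∈ e, a ≠ ';') (out : List Char) :
    zsStep (e.foldl zsStep (out, 0, [])) ';' = (out ++ entryOut e ++ [';'], 0, []) := by
  have hj : PySem.Chars.join [':'] (mySplit ':' e) = e := join_mySplit ':' e
  rcases entry_state' (mySplit ':' e) (entry_fields e he) out with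
      ⟨hlen, hst⟩ | ⟨a, b, t, hms, hst⟩ | ⟨a, b, t, rest, hrne, hms, c', hc', hst⟩
  · rw [hj] at hst
    rw [hst, entryOut_short e hlen]
    simp [zsStep]
    omega
  · rw [hj] at hst
    rw [hst, entryOut_long e a b t [] hms]
    simp [zsStep]
  · rw [hj] at hst
    rw [hst, entryOut_long e a b t rest hms, if_neg hrne]
    simp [zsStep, hc']

theorem run_entries : ∀ (es : List (List Char)), (∀ e ∈ es, ∀ a ∈ e, a ≠ ';') → ∀ (out : List Char),
    finz ((PySem.Chars.join [';'] es).foldl zsStep (out, 0, []))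
      = out ++ PySem.Chars.join [';'] (es.map entryOut) := by
  intro es
  induction es with
  | nil => intro _ out; simp [PySem.Chars.join_nil, finz]
  | cons e t ih =>
    intro h out
    cases t with
    | nil =>
      simp only [List.map_cons, List.map_nil, PySem.Chars.join_singleton]
      exact entry_finz e (h e List.mem_cons_self) out
    | cons e2 t2 =>
      rw [PySem.Chars.join_cons_cons, List.foldl_append, List.foldl_append, List.foldl_cons,
        List.foldl_nil, entry_semi e (h e List.mem_cons_self) out,
        ih (fun x hx => h x (List.mem_cons_of_mem _ hx)) (out ++ entryOut e ++ [';'])]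
      simp only [List.map_cons]
      rw [PySem.Chars.join_cons_cons]
      simp

-- ===== VERDICT (by name: the statement is the Claim_ definition above) =====
theorem zero_srcmap_indices_spec : Claim_equal_zero_srcmap_indices := by
  intro s _
  unfold Spec_zero_srcmap_indices
  rw [A_eq_map, zero_srcmap_indices_alt]
  have hes : ∀ e ∈ mySplit ';' s.toList, ∀ a ∈ e, a ≠ ';' := by
    intro e he a ha hc
    exact sep_not_mem_mySplit ';' s.toList e he (hc ▸ ha)
  have := run_entries (mySplit ';' s.toList) hes []
  rw [join_mySplit] at this
  simp only [List.nil_append] at this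
  rw [show (if (s.toList.foldl zsStep ([], 0, [])).2.1 = 2 then
        (s.toList.foldl zsStep ([], 0, [])).1 ++ zsFlush (s.toList.foldl zsStep ([], 0, [])).2.2
      else (s.toList.foldl zsStep ([], 0, [])).1) = finz (s.toList.foldl zsStep ([], 0, [])) from rfl,
    this]
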